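-- pv_equiv track=rewrite | github.com/FunkyGhetto/rimregisteret | scripts/parse_phonetics.py | parse_nofabet_stress
-- ===== SOURCE A (Python) =====
-- from typing import Optional
--
-- def parse_nofabet_stress(nofabet: str) -> Optional[list]:
--     """Extract per-phoneme stress levels from NoFABET transcription.
--
--     NoFABET format: space-separated phonemes with trailing digit for stress.
--     Returns list of stress levels for vowel phonemes only.
--     """
--     if not nofabet.strip():
--         return None
--     tokens = nofabet.strip().split()
--     stresses = []
--     for token in tokens:
--         if token and token[-1].isdigit():
--             stresses.append(int(token[-1]))
--     return stresses
-- ===== SOURCE B (Python) =====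
-- import re
-- from typing import Optional
--
-- def parse_nofabet_stress(nofabet: str) -> Optional[list]:
--     """Regex single-pass: a stress digit is any digit immediately followed by
--     whitespace or end-of-string in the stripped transcription."""
--     s = nofabet.strip()
--     if not s:
--         return None
--     return [int(d) for d in re.findall(r'\d(?=\s|$)', s)]
-- ===== Notes on version B (the rewrite author's own statement) =====
-- stated objective: idiomatic
-- what changed: Replaced the tokenize-then-inspect-last-char loop with a single pattern-driven scan that emits every digit immediately followed by whitespace or end-of-string (re.findall with a lookahead).
import Mathlib
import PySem

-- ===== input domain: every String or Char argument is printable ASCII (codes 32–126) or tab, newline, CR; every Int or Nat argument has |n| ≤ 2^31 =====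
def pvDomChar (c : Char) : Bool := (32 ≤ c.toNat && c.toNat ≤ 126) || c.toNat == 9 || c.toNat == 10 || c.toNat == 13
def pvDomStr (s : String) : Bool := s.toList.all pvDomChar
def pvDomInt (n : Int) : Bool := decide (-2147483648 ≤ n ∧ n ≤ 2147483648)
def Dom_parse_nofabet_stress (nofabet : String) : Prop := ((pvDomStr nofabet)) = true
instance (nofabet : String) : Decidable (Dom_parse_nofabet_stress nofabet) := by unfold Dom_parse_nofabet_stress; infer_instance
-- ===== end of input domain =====

-- B replaces A's tokenize-then-take-last-char loop by one lookahead scan (a digit followed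
-- by whitespace or end-of-string is a stress digit); same cost, more direct traversal.

-- int(<one-digit string>) — exact for a digit character
def pvDigitVal (c : Char) : Int := (c.toNat : Int) - 48

-- ===== PORT A =====
-- one loop iteration: `if token and token[-1].isdigit(): stresses.append(int(token[-1]))`
-- (token[-1] via pyGet?; its `none` case is exactly the failing `token and …` guard)
def pvA_step (stresses : List Int) (token : String) : List Int :=
  match PySem.Str.pyGet? token (-1) with
  | some c => if PySem.Chars.isdigit c then stresses ++ [pvDigitVal c] else stresses
  | none => stresses

def parse_nofabet_stress (nofabet : String) : Option (List Int) :=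
  if PySem.Str.strip nofabet = "" then none
  else some ((PySem.Str.split₀ (PySem.Str.strip nofabet)).foldl pvA_step [])

-- ===== PORT B =====
-- the regex lookahead `(?=\s|$)`
def pvLookahead : List Char → Bool
  | [] => true
  | r :: _ => PySem.Chars.isspace r

-- the left-to-right scan performed by re.findall(r'\d(?=\s|$)', s), each match int()ed
def pvB_scan : List Char → List Int
  | [] => []
  | c :: rest =>
      if PySem.Chars.isdigit c && pvLookahead rest then pvDigitVal c :: pvB_scan rest
      else pvB_scan rest

def parse_nofabet_stress_alt (nofabet : String) : Option (List Int) :=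
  let s := PySem.Str.strip nofabet
  if s = "" then none else some (pvB_scan s.toList)

-- ===== PRECONDITION & SPEC =====
def Spec_parse_nofabet_stress (nofabet : String) (out : Option (List Int)) : Prop := out = parse_nofabet_stress_alt nofabet
instance (nofabet : String) (out : Option (List Int)) : Decidable (Spec_parse_nofabet_stress nofabet out) := by unfold Spec_parse_nofabet_stress; infer_instance

-- ===== CLAIM (what is proved, stated in full; the proofs are below) =====
def Claim_equal_parse_nofabet_stress : Prop := ∀ (nofabet : String), Dom_parse_nofabet_stress nofabet → Spec_parse_nofabet_stress nofabet (parse_nofabet_stress nofabet)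

-- ===== LEMMAS AND PROOFS =====

-- A's per-token contribution, at the character-list level
def pvLastDigit (t : List Char) : List Int :=
  match PySem.List.pyGet? t (-1) with
  | some c => if PySem.Chars.isdigit c then [pvDigitVal c] else []
  | none => []

theorem pvA_step_mk (acc : List Int) (t : List Char) :
    pvA_step acc (String.ofList t) = acc ++ pvLastDigit t := by
  unfold pvA_step pvLastDigit
  simp only [PySem.Str.pyGet?, PySem.Chars.pyGet?_eq_listPyGet?, String.toList_ofList]
  cases h : PySem.List.pyGet? t (-1) with
  | none => simp
  | some c => by_cases hd : PySem.Chars.isdigit c = true <;> simp [hd]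

theorem pvA_foldl (l : List (List Char)) (acc : List Int) :
    (l.map String.ofList).foldl pvA_step acc = acc ++ l.flatMap pvLastDigit := by
  induction l generalizing acc with
  | nil => simp
  | cons t ts ih => simp [pvA_step_mk, ih, List.append_assoc]

theorem pvLastDigit_cons_cons (c d : Char) (t : List Char) :
    pvLastDigit (c :: d :: t) = pvLastDigit (d :: t) := by
  unfold pvLastDigit
  simp [PySem.List.pyGet?, PySem.List.pyIdx?, List.getElem?_cons]

theorem pvSpace_not_digit (c : Char) (h : PySem.Chars.isspace c = true) :
    PySem.Chars.isdigit c = false := by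
  simp only [PySem.Chars.isspace, PySem.Chars.isdigit, Bool.or_eq_true, Bool.and_eq_true,
    decide_eq_true_eq, Char.le_def, Char.toNat] at h ⊢
  simp only [Bool.and_eq_false_iff, decide_eq_false_iff_not]
  rw [UInt32.le_iff_toNat_le, UInt32.le_iff_toNat_le]
  have h0 : '0'.val.toNat = 48 := rfl
  have h9 : '9'.val.toNat = 57 := rfl
  omega

-- a whitespace-free token followed by nothing or by whitespace contributes exactly its trailing digit
theorem pvScan_token (t rs : List Char) (ht : ∀ c ∈ t, PySem.Chars.isspace c = false)
    (hrs : pvLookahead rs = true) :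
    pvB_scan (t ++ rs) = pvLastDigit t ++ pvB_scan rs := by
  match t with
  | [] => simp [pvLastDigit, PySem.List.pyGet?, PySem.List.pyIdx?]
  | [c] =>
      by_cases hd : PySem.Chars.isdigit c = true <;>
        simp [pvB_scan, hrs, hd, pvLastDigit, PySem.List.pyGet?, PySem.List.pyIdx?]
  | c :: d :: t' =>
      have hd : PySem.Chars.isspace d = false := ht d (by simp)
      have ih := pvScan_token (d :: t') rs (fun x hx => ht x (by simp at hx ⊢; tauto)) hrs
      rw [show ((c :: d :: t') ++ rs) = c :: ((d :: t') ++ rs) from rfl, pvB_scan]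
      have hla : pvLookahead ((d :: t') ++ rs) = false := by simp [pvLookahead, hd]
      rw [hla, Bool.and_false]
      simp only [Bool.false_eq_true, if_false]
      rw [ih, pvLastDigit_cons_cons]

theorem pvScan_space (c : Char) (rs : List Char) (h : PySem.Chars.isspace c = true) :
    pvB_scan (c :: rs) = pvB_scan rs := by
  simp [pvB_scan, pvSpace_not_digit c h]

-- invariant of split₀.go: flat-mapping A's extraction over its output is B's scan of the remainder
theorem pvGo_scan (rest cur : List Char) (acc : List (List Char))
    (hcur : ∀ c ∈ cur, PySem.Chars.isspace c = false) :
    (PySem.Chars.split₀.go rest cur acc).flatMap pvLastDigit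
      = acc.reverse.flatMap pvLastDigit ++ pvB_scan (cur.reverse ++ rest) := by
  induction rest generalizing cur acc with
  | nil =>
      rw [PySem.Chars.split₀.go]
      have hrev : ∀ x ∈ cur.reverse, PySem.Chars.isspace x = false :=
        fun x hx => hcur x (List.mem_reverse.mp hx)
      by_cases hc : cur.isEmpty = true
      · rw [if_pos hc]
        rw [List.isEmpty_iff] at hc; subst hc
        simp [pvB_scan]
      · rw [if_neg hc]
        simp only [List.reverse_cons, List.flatMap_append, List.flatMap_cons, List.flatMap_nil,
          List.append_nil]
        have h := pvScan_token cur.reverse [] hrev rfl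
        simp only [List.append_nil, pvB_scan] at h
        rw [h]
  | cons r rs ih =>
      rw [PySem.Chars.split₀.go]
      by_cases hsp : PySem.Chars.isspace r = true
      · rw [if_pos hsp]
        by_cases hc : cur.isEmpty = true
        · rw [if_pos hc]
          rw [List.isEmpty_iff] at hc; subst hc
          rw [ih [] acc (by simp)]
          simp [pvScan_space r rs hsp]
        · rw [if_neg hc]
          have hrev : ∀ x ∈ cur.reverse, PySem.Chars.isspace x = false :=
            fun x hx => hcur x (List.mem_reverse.mp hx)
          rw [ih [] (cur.reverse :: acc) (by simp)]
          simp only [List.reverse_cons, List.flatMap_append, List.flatMap_cons, List.flatMap_nil,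
            List.append_nil, List.reverse_nil, List.nil_append]
          rw [pvScan_token cur.reverse (r :: rs) hrev (by simp [pvLookahead, hsp]),
            pvScan_space r rs hsp]
          simp [List.append_assoc]
      · rw [if_neg hsp]
        have hcur' : ∀ x ∈ r :: cur, PySem.Chars.isspace x = false := by
          intro x hx
          rcases List.mem_cons.mp hx with h | h
          · subst h; exact Bool.eq_false_iff.mpr hsp
          · exact hcur x h
        rw [ih (r :: cur) acc hcur']
        simp [List.append_assoc]

theorem pvSplit_scan (l : List Char) :
    (PySem.Chars.split₀ l).flatMap pvLastDigit = pvB_scan l := by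
  have h := pvGo_scan l [] [] (by simp)
  simpa [PySem.Chars.split₀] using h

-- ===== VERDICT (by name: the statement is the Claim_ definition above) =====
theorem parse_nofabet_stress_spec : Claim_equal_parse_nofabet_stress := by
  intro s _
  unfold Spec_parse_nofabet_stress parse_nofabet_stress parse_nofabet_stress_alt
  by_cases h : PySem.Str.strip s = ""
  · simp [h]
  · simp only [h]
    rw [PySem.Str.split₀, pvA_foldl, List.nil_append, pvSplit_scan]
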